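-- pv_equiv track=rewrite | github.com/dynamic98/IdentiGaze | DataAnalysisMadeSet.py | sessionSet
-- ===== SOURCE A (Python) =====
-- def sessionSet(stimuliType):
--     setdict = {}
--     if stimuliType == 'different':
--         for i in range(1280):
--             setdict[i] = f"{i//256+1}_{i%256}"
--     elif stimuliType == 'similar':
--         for i in range(980):
--             setdict[i] = f"{i//196+1}_{i%196}"
--     return setdict
-- ===== SOURCE B (Python) =====
-- def sessionSet(stimuliType):
--     if stimuliType == 'different':
--         rows, cols = 5, 256
--     elif stimuliType == 'similar':
--         rows, cols = 5, 196
--     else: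
--         return {}
--     setdict = {}
--     idx = 0
--     for r in range(rows):
--         for c in range(cols):
--             setdict[idx] = f"{r+1}_{c}"
--             idx += 1
--     return setdict
-- ===== Notes on version B (the rewrite author's own statement) =====
-- stated objective: simpler
-- what changed: Replaced the flat loop with // and % arithmetic by a nested row/column double loop with a running index, so the group number and offset are the loop variables themselves and no division is needed.
import Mathlib
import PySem

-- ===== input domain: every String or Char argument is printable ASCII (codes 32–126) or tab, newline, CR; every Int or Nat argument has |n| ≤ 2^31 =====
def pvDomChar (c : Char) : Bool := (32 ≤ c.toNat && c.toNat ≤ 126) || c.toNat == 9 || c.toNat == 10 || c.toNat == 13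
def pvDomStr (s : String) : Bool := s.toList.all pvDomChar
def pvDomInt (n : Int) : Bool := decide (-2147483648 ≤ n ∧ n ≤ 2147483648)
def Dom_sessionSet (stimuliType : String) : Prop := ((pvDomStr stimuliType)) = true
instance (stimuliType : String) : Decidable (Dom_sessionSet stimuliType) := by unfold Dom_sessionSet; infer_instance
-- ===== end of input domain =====

-- B replaces A's flat loop with //-and-% arithmetic by a nested row/column loop with a running index (simpler decomposition; same O(n) cost).


-- ===== PORT A =====
def sessionSet (stimuliType : String) : List (Int × String) :=
  let setdict : PySem.Dict Int String := PySem.Dict.empty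
  let setdict :=
    if stimuliType = "different" then
      (PySem.List.pyRange 0 1280).foldl
        (fun d i =>
          d.insert i (PySem.Int.toStr (PySem.Int.floordiv i 256 + 1) ++ "_" ++
            PySem.Int.toStr (PySem.Int.mod i 256))) setdict
    else if stimuliType = "similar" then
      (PySem.List.pyRange 0 980).foldl
        (fun d i =>
          d.insert i (PySem.Int.toStr (PySem.Int.floordiv i 196 + 1) ++ "_" ++
            PySem.Int.toStr (PySem.Int.mod i 196))) setdict
    else setdict
  setdict.items

-- ===== PORT B =====
-- helper of B: fill the dict row by row with a running index
def sessionSetAltFill (rows cols : Int) : List (Int × String) :=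
  ((PySem.List.pyRange 0 rows).foldl
    (fun (st : PySem.Dict Int String × Int) r =>
      (PySem.List.pyRange 0 cols).foldl
        (fun st c =>
          (st.1.insert st.2 (PySem.Int.toStr (r + 1) ++ "_" ++ PySem.Int.toStr c), st.2 + 1)) st)
    (PySem.Dict.empty, 0)).1.items

def sessionSet_alt (stimuliType : String) : List (Int × String) :=
  if stimuliType = "different" then sessionSetAltFill 5 256
  else if stimuliType = "similar" then sessionSetAltFill 5 196
  else (PySem.Dict.empty : PySem.Dict Int String).items

-- ===== PRECONDITION & SPEC =====
def Spec_sessionSet (stimuliType : String) (out : List (Int × String)) : Prop := out = sessionSet_alt stimuliType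
instance (stimuliType : String) (out : List (Int × String)) : Decidable (Spec_sessionSet stimuliType out) := by unfold Spec_sessionSet; infer_instance

-- ===== CLAIM (what is proved, stated in full; the proofs are below) =====
def Claim_equal_sessionSet : Prop := ∀ (stimuliType : String), Dom_sessionSet stimuliType → Spec_sessionSet stimuliType (sessionSet stimuliType)

-- ===== LEMMAS AND PROOFS =====

-- B's inner loop: inserting n fresh consecutive keys starting at idx appends n pairs.
theorem pv_inner (g : Nat → String) (d : PySem.Dict Int String) (idx : Int)
    (hk : ∀ k ∈ d.keys, k < idx) (n : Nat) :
    (((List.range n).foldl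
        (fun (st : PySem.Dict Int String × Int) c => (st.1.insert st.2 (g c), st.2 + 1)) (d, idx)).1.items
        = d.items ++ (List.range n).map (fun (c : Nat) => (idx + (c : Int), g c)))
    ∧ (((List.range n).foldl
        (fun (st : PySem.Dict Int String × Int) c => (st.1.insert st.2 (g c), st.2 + 1)) (d, idx)).1.keys
        = d.keys ++ (List.range n).map (fun (c : Nat) => idx + (c : Int)))
    ∧ (((List.range n).foldl
        (fun (st : PySem.Dict Int String × Int) c => (st.1.insert st.2 (g c), st.2 + 1)) (d, idx)).2
        = idx + n) := by
  induction n with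
  | zero => simp
  | succ n ih =>
    obtain ⟨hi, hkeys, hsnd⟩ := ih
    rw [List.range_succ]
    simp only [List.foldl_append, List.foldl_cons, List.foldl_nil, List.map_append,
      List.map_cons, List.map_nil]
    have hc : (((List.range n).foldl
        (fun (st : PySem.Dict Int String × Int) c => (st.1.insert st.2 (g c), st.2 + 1)) (d, idx)).1).contains
        (((List.range n).foldl
        (fun (st : PySem.Dict Int String × Int) c => (st.1.insert st.2 (g c), st.2 + 1)) (d, idx)).2) = false := by
      rw [hsnd, PySem.Dict.contains_eq_decide_mem_keys, hkeys]
      simp only [decide_eq_false_iff_not, List.mem_append, List.mem_map, List.mem_range]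
      rintro (hmem | ⟨c, hclt, hceq⟩)
      · exact absurd (hk _ hmem) (by omega)
      · omega
    refine ⟨?_, ?_, ?_⟩
    · rw [PySem.Dict.items_insert_of_not_contains _ _ hc, hi, hsnd, List.append_assoc]
    · rw [PySem.Dict.keys_insert_of_not_contains _ _ hc, hkeys, hsnd, List.append_assoc]
    · rw [hsnd]; push_cast; ring

-- B's outer loop over rows produces exactly the flat enumeration with i/C and i%C.
theorem pv_outer (C : Nat) (hC : 0 < C) (val : Nat → Nat → String) (R : Nat) :
    ((((List.range R).foldl
        (fun (st : PySem.Dict Int String × Int) r =>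
          (List.range C).foldl (fun st c => (st.1.insert st.2 (val r c), st.2 + 1)) st)
        (PySem.Dict.empty, 0)).1.items
      = (List.range (R * C)).map (fun (i : Nat) => ((i : Int), val (i / C) (i % C))))
    ∧ (((List.range R).foldl
        (fun (st : PySem.Dict Int String × Int) r =>
          (List.range C).foldl (fun st c => (st.1.insert st.2 (val r c), st.2 + 1)) st)
        (PySem.Dict.empty, 0)).1.keys
      = (List.range (R * C)).map (fun (i : Nat) => (i : Int)))
    ∧ (((List.range R).foldl
        (fun (st : PySem.Dict Int String × Int) r =>
          (List.range C).foldl (fun st c => (st.1.insert st.2 (val r c), st.2 + 1)) st)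
        (PySem.Dict.empty, 0)).2
      = ((R * C : Nat) : Int))) := by
  induction R with
  | zero => simp [PySem.Dict.empty]
  | succ R ih =>
    obtain ⟨hi, hkeys, hsnd⟩ := ih
    rw [List.range_succ]
    simp only [List.foldl_append, List.foldl_cons, List.foldl_nil]
    set res := (List.range R).foldl
        (fun (st : PySem.Dict Int String × Int) r =>
          (List.range C).foldl (fun st c => (st.1.insert st.2 (val r c), st.2 + 1)) st)
        (PySem.Dict.empty, 0) with hres
    have hfresh : ∀ k ∈ res.1.keys, k < res.2 := by
      rw [hkeys, hsnd]
      intro k hkmem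
      simp only [List.mem_map, List.mem_range] at hkmem
      obtain ⟨i, hilt, rfl⟩ := hkmem
      omega
    obtain ⟨gi, gk, gs⟩ := pv_inner (fun c => val R c) res.1 res.2 hfresh C
    rw [← Prod.mk.eta (p := res)]
    have hrng : List.range ((R + 1) * C) = List.range (R * C) ++ (List.range C).map (R * C + ·) := by
      rw [Nat.succ_mul, List.range_add]
    refine ⟨?_, ?_, ?_⟩
    · rw [gi, hi, hsnd, hrng, List.map_append, List.map_map]
      congr 1
      apply List.map_congr_left
      intro c hcmem
      simp only [List.mem_range] at hcmem
      have hdiv : (R * C + c) / C = R := by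
        rw [Nat.add_comm, Nat.mul_comm, Nat.add_mul_div_left _ _ hC, Nat.div_eq_of_lt hcmem]
        exact Nat.zero_add R
      have hmod : (R * C + c) % C = c := by
        rw [Nat.add_comm, Nat.mul_comm, Nat.add_mul_mod_self_left, Nat.mod_eq_of_lt hcmem]
      simp only [Function.comp_apply, hdiv, hmod, Prod.mk.injEq]
      exact ⟨by push_cast; ring, trivial⟩
    · rw [gk, hkeys, hsnd, hrng, List.map_append, List.map_map]
      congr 1
    · rw [gs, hsnd]; push_cast; ring

-- one branch: A's flat fold over R*C equals B's nested fill
theorem pv_branch (R C : Nat) (hC : 0 < C) :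
    ((PySem.List.pyRange 0 ((R * C : Nat) : Int)).foldl
      (fun d i =>
        d.insert i (PySem.Int.toStr (PySem.Int.floordiv i (C : Int) + 1) ++ "_" ++
          PySem.Int.toStr (PySem.Int.mod i (C : Int))))
      (PySem.Dict.empty : PySem.Dict Int String)).items
    = sessionSetAltFill ((R : Nat) : Int) ((C : Nat) : Int) := by
  have lhs : ((PySem.List.pyRange 0 ((R * C : Nat) : Int)).foldl
      (fun d i =>
        d.insert i (PySem.Int.toStr (PySem.Int.floordiv i (C : Int) + 1) ++ "_" ++
          PySem.Int.toStr (PySem.Int.mod i (C : Int))))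
      (PySem.Dict.empty : PySem.Dict Int String)).items
      = (List.range (R * C)).map
          (fun (i : Nat) => ((i : Int), PySem.Int.toStr (((i / C : Nat) : Int) + 1) ++ "_" ++
            PySem.Int.toStr ((i % C : Nat) : Int))) := by
    rw [PySem.List.pyRange_zero_natCast, List.foldl_map]
    have := PySem.Dict.items_foldl_insert_fresh (List.range (R * C))
      (fun (i : Nat) => (i : Int))
      (fun (i : Nat) => PySem.Int.toStr (PySem.Int.floordiv (i : Int) (C : Int) + 1) ++ "_" ++
        PySem.Int.toStr (PySem.Int.mod (i : Int) (C : Int)))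
      (PySem.Dict.empty : PySem.Dict Int String)
      (by intro a _; simp [PySem.Dict.contains_empty])
      ((List.nodup_range).map Nat.cast_injective)
    rw [this]
    simp [PySem.Dict.empty, PySem.Int.floordiv_natCast, PySem.Int.mod_natCast]
  rw [lhs]
  unfold sessionSetAltFill
  simp only [PySem.List.pyRange_zero_natCast, List.foldl_map]
  exact (pv_outer C hC
    (fun r c => PySem.Int.toStr ((r : Int) + 1) ++ "_" ++ PySem.Int.toStr (c : Int)) R).1.symm

-- ===== VERDICT (by name: the statement is the Claim_ definition above) =====
theorem sessionSet_spec : Claim_equal_sessionSet := by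
  intro s _
  unfold Spec_sessionSet
  by_cases h1 : s = "different"
  · unfold sessionSet sessionSet_alt
    simp only [if_pos h1]
    have h := pv_branch 5 256 (by norm_num)
    simp only [Nat.reduceMul, Nat.cast_ofNat] at h
    exact h
  · by_cases h2 : s = "similar"
    · unfold sessionSet sessionSet_alt
      simp only [if_neg h1, if_pos h2]
      have h := pv_branch 5 196 (by norm_num)
      simp only [Nat.reduceMul, Nat.cast_ofNat] at h
      exact h
    · unfold sessionSet sessionSet_alt
      simp only [if_neg h1, if_neg h2]
      try rfl
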